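-- pv_equiv track=rewrite | github.com/dandumitriu33/CodeWarsPython | set1/validparantheses.py | last_para
-- ===== SOURCE A (Python) =====
-- def last_para(string):
--     j = len(string) - 1
--     last_para = ''
--     while j >= 0:
--         if string[j] == ')' or string[j] == '(':
--             last_para = string[j]
--             break
--         else:
--             j -= 1
--             continue
--     if last_para == '(':
--         return False
--     else:
--         return True
-- ===== SOURCE B (Python) =====
-- def last_para(string):
--     parens = [c for c in string if c == '(' or c == ')']
--     if parens and parens[-1] == '(':
--         return False
--     return True
-- ===== Notes on version B (the rewrite author's own statement) =====
-- stated objective: simpler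
-- what changed: Replaces A's reverse index loop with early exit by a forward collect-all list-comprehension filter of parenthesis characters followed by a check of the last collected element.
import Mathlib
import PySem

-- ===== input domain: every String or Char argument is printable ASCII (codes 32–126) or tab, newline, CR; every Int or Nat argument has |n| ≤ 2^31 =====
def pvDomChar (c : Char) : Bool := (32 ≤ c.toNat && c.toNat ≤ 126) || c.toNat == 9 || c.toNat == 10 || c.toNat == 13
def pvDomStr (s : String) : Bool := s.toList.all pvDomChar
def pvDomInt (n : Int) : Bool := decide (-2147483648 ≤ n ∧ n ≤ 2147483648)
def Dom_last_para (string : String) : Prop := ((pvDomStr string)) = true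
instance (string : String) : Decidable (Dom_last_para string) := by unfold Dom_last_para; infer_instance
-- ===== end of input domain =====

-- B: forward filter of parenthesis characters then check the last one; simpler decomposition, same O(n) cost.
-- ===== PORT A =====
-- reverse while-loop of A: fuel n means current index j = n-1; j -= 1 is the recursive call
def lastParaAux (cs : List Char) : Nat → Option Char
  | 0 => none
  | n+1 =>
    match cs[n]? with
    | some c => if c = ')' ∨ c = '(' then some c else lastParaAux cs n
    | none => none

def last_para (string : String) : Bool :=
  let cs := string.toList
  match lastParaAux cs cs.length with
  | some '(' => false
  | _ => true

-- ===== PORT B =====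
def last_para_alt (string : String) : Bool :=
  let parens := string.toList.filter (fun c => c = '(' ∨ c = ')')
  if parens ≠ [] ∧ parens.getLast? = some '(' then false else true

-- ===== PRECONDITION & SPEC =====
def Spec_last_para (string : String) (out : Bool) : Prop := out = last_para_alt string
instance (string : String) (out : Bool) : Decidable (Spec_last_para string out) := by unfold Spec_last_para; infer_instance

-- ===== CLAIM (what is proved, stated in full; the proofs are below) =====
def Claim_equal_last_para : Prop := ∀ (string : String), Dom_last_para string → Spec_last_para string (last_para string)

-- ===== LEMMAS AND PROOFS =====

-- ===== VERDICT (by name: the statement is the Claim_ definition above) =====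
theorem lastParaAux_eq_filter_getLast (cs : List Char) (n : Nat) (hn : n ≤ cs.length) :
    lastParaAux cs n = ((cs.take n).filter (fun c => decide (c = '(' ∨ c = ')'))).getLast? := by
  induction n with
  | zero => simp [lastParaAux]
  | succ k ih =>
    have hk : k < cs.length := hn
    have hget : cs[k]? = some cs[k] := List.getElem?_eq_getElem hk
    have htake : cs.take (k+1) = cs.take k ++ [cs[k]] := by
      exact List.take_succ_eq_append_getElem (l := cs) hk
    rw [lastParaAux, hget, htake, List.filter_append]
    by_cases hc : cs[k] = ')' ∨ cs[k] = '('
    · have hc' : cs[k] = '(' ∨ cs[k] = ')' := hc.symm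
      simp [hc, hc']
    · have hc' : ¬ (cs[k] = '(' ∨ cs[k] = ')') := fun h => hc h.symm
      simp [hc, hc', ih (Nat.le_of_lt hk)]

theorem last_para_spec : Claim_equal_last_para := by
  intro s _
  unfold Spec_last_para last_para last_para_alt
  simp only []
  rw [lastParaAux_eq_filter_getLast _ _ le_rfl, List.take_length]
  rcases h : (s.toList.filter (fun c => decide (c = '(' ∨ c = ')'))).getLast? with _ | c
  · simp [List.getLast?_eq_none_iff.mp h]
  · have hne : s.toList.filter (fun c => decide (c = '(' ∨ c = ')')) ≠ [] := by
      intro he; rw [he] at h; simp at h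
    by_cases hc : c = '('
    · subst hc
      rw [if_pos ⟨hne, rfl⟩]
      decide
    · rw [if_neg (fun hp => hc (Option.some.inj hp.2))]
      simp [hc]
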